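-- pv_equiv track=rewrite | github.com/ttdduu/furnarius | editar_silabas.py | combinaciones
-- ===== SOURCE A (Python) =====
-- def combinaciones(lista_trazos1, lista_trazos2):
--     combinations = []
--     for item1 in lista_trazos1:
--         # Iterate over each element in list2
--         for item2 in lista_trazos2:
--             # Append the combination [item1, it
--             combinations.append(
--                 [item1, item2, f'{item1.split(".")[0]}-{item2.split(".")[0]}']
--             )
--     return combinations
-- ===== SOURCE B (Python) =====
-- def combinaciones(lista_trazos1, lista_trazos2):
--     # single flat loop over the n*m index space, decoding each pair by divmod
--     m = len(lista_trazos2)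
--     out = []
--     for k in range(len(lista_trazos1) * m):
--         x = lista_trazos1[k // m]
--         y = lista_trazos2[k % m]
--         out.append([x, y, x.split('.')[0] + '-' + y.split('.')[0]])
--     return out
-- ===== Notes on version B (the rewrite author's own statement) =====
-- stated objective: alternative
-- what changed: B replaces A's two nested loops with a single flat loop over range(n*m), decoding each index into the pair of elements by divmod (k//m, k%m) instead of iterating the lists themselves.
import Mathlib
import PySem

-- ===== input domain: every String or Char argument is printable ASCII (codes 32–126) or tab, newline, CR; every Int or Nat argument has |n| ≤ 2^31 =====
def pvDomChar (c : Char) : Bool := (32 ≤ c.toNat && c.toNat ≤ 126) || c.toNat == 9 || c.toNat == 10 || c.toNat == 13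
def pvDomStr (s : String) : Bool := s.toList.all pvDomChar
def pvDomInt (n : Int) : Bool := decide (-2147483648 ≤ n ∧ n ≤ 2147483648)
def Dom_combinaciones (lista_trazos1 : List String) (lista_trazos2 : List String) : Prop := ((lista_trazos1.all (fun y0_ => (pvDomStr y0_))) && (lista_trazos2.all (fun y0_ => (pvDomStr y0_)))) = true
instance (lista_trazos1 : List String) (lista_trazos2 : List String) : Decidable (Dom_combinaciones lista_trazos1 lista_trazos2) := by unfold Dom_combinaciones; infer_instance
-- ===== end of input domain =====

-- B replaces A's nested loops over the two lists by one flat loop over range(n*m),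
-- decoding each index with divmod. Objective: alternative decomposition.

-- ===== PORT A =====
-- s.split(".")[0] : sep "." is nonempty so split? = some, and split never yields [], so neither getD default is taken
def pvPrefA (s : String) : String := (PySem.List.pyGet? ((PySem.Str.split? s ".").getD []) 0).getD ""

def combinaciones (lista_trazos1 : List String) (lista_trazos2 : List String) : List (List String) :=
  lista_trazos1.foldl (fun combs item1 =>
    lista_trazos2.foldl (fun combs item2 =>
      combs ++ [[item1, item2, pvPrefA item1 ++ "-" ++ pvPrefA item2]]) combs) []

-- ===== PORT B =====
def pvPrefB (s : String) : String := (PySem.List.pyGet? ((PySem.Str.split? s ".").getD []) 0).getD ""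

-- the indices k // m and k % m are always in range, so the pyGetD default "" is never taken
def combinaciones_alt (lista_trazos1 : List String) (lista_trazos2 : List String) : List (List String) :=
  let m : Int := lista_trazos2.length
  (PySem.List.pyRange 0 ((lista_trazos1.length : Int) * m) 1).foldl
    (fun out k =>
      let x := PySem.List.pyGetD lista_trazos1 (PySem.Int.floordiv k m) ""
      let y := PySem.List.pyGetD lista_trazos2 (PySem.Int.mod k m) ""
      out ++ [[x, y, pvPrefB x ++ "-" ++ pvPrefB y]]) []

-- ===== PRECONDITION & SPEC =====
def Spec_combinaciones (lista_trazos1 : List String) (lista_trazos2 : List String) (out : List (List String)) : Prop := out = combinaciones_alt lista_trazos1 lista_trazos2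
instance (lista_trazos1 : List String) (lista_trazos2 : List String) (out : List (List String)) : Decidable (Spec_combinaciones lista_trazos1 lista_trazos2 out) := by unfold Spec_combinaciones; infer_instance

-- ===== CLAIM (what is proved, stated in full; the proofs are below) =====
def Claim_equal_combinaciones : Prop := ∀ (lista_trazos1 : List String) (lista_trazos2 : List String), Dom_combinaciones lista_trazos1 lista_trazos2 → Spec_combinaciones lista_trazos1 lista_trazos2 (combinaciones lista_trazos1 lista_trazos2)

-- ===== LEMMAS AND PROOFS =====

-- mapping a function of the k-th element over range(len l) is mapping over l
theorem map_range_getD {α β : Type} (l : List α) (d : α) (f : α → β) :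
    (List.range l.length).map (fun k => f (l.getD k d)) = l.map f := by
  induction l with
  | nil => rfl
  | cons a t ih =>
      rw [List.length_cons, List.range_succ_eq_map, List.map_cons, List.map_map]
      simp only [Function.comp_def, List.getD_cons_zero, List.getD_cons_succ, List.map_cons]
      rw [ih]

-- divmod decoding of the flat index space equals the nested product
theorem map_range_div_mod (l1 l2 : List String) (g : String → String → List String) :
    (List.range (l1.length * l2.length)).map
      (fun k => g (l1.getD (k / l2.length) "") (l2.getD (k % l2.length) ""))
    = l1.flatMap (fun x => l2.map (g x)) := by
  rcases Nat.eq_zero_or_pos l2.length with hm | hm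
  · obtain rfl : l2 = [] := List.length_eq_zero_iff.mp hm
    simp
  · induction l1 with
    | nil => simp
    | cons x t ih =>
        have hlen : (x :: t).length * l2.length = l2.length + t.length * l2.length := by
          rw [List.length_cons]; ring
        rw [hlen, List.range_add, List.map_append, List.map_map, List.flatMap_cons]
        congr 1
        · rw [List.map_congr_left (g := fun k => g x (l2.getD k ""))
            (fun k hk => by
              have hk' : k < l2.length := List.mem_range.mp hk
              simp [Nat.div_eq_of_lt hk', Nat.mod_eq_of_lt hk'])]
          exact map_range_getD l2 "" (g x)
        · rw [List.map_congr_left (g := fun k => g (t.getD (k / l2.length) "") (l2.getD (k % l2.length) ""))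
            (fun k _ => by
              simp only [Function.comp_def]
              rw [Nat.add_comm l2.length k, Nat.add_div_right k hm, Nat.add_mod_right]
              simp)]
          exact ih

-- A's inner loop appends the row for item1; the outer loop accumulates the flat product
theorem combinaciones_eq_flatMap (l1 l2 : List String) (c : List (List String)) :
    l1.foldl (fun combs item1 =>
      l2.foldl (fun combs item2 =>
        combs ++ [[item1, item2, pvPrefA item1 ++ "-" ++ pvPrefA item2]]) combs) c
    = c ++ l1.flatMap (fun x => l2.map (fun y => [x, y, pvPrefA x ++ "-" ++ pvPrefA y])) := by
  induction l1 generalizing c with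
  | nil => simp
  | cons x t ih =>
      simp only [List.foldl_cons]
      rw [PySem.List.foldl_append_singleton_eq_map, ih, List.flatMap_cons, List.append_assoc]

-- B's flat loop is the same flatMap
theorem alt_eq_flatMap (l1 l2 : List String) :
    combinaciones_alt l1 l2
    = l1.flatMap (fun x => l2.map (fun y => [x, y, pvPrefB x ++ "-" ++ pvPrefB y])) := by
  unfold combinaciones_alt
  rw [PySem.List.foldl_append_singleton_eq_map]
  have hN : ((l1.length : Int) * (l2.length : Int)) = ((l1.length * l2.length : Nat) : Int) := by
    push_cast; ring
  rw [hN, PySem.List.pyRange_one, List.map_map]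
  have hcast : (((l1.length * l2.length : Nat) : Int) - 0).toNat = l1.length * l2.length := by
    omega
  rw [hcast, List.nil_append]
  rw [List.map_congr_left
    (g := fun k => [l1.getD (k / l2.length) "", l2.getD (k % l2.length) "",
      pvPrefB (l1.getD (k / l2.length) "") ++ "-" ++ pvPrefB (l2.getD (k % l2.length) "")])
    (fun k _ => by
      simp only [Function.comp_apply]
      rw [Int.zero_add, PySem.Int.floordiv_natCast, PySem.Int.mod_natCast,
        PySem.List.pyGetD_natCast, PySem.List.pyGetD_natCast])]
  exact map_range_div_mod l1 l2 (fun x y => [x, y, pvPrefB x ++ "-" ++ pvPrefB y])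

-- ===== VERDICT (by name: the statement is the Claim_ definition above) =====
theorem combinaciones_spec : Claim_equal_combinaciones := by
  intro l1 l2 _
  unfold Spec_combinaciones combinaciones
  rw [combinaciones_eq_flatMap, alt_eq_flatMap]
  simp [pvPrefA, pvPrefB]
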